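-- pv_equiv track=rewrite | github.com/chunibyo-wly/CAD2lableme | cad2labelme.py | group_walls
-- ===== SOURCE A (Python) =====
-- class UnionFindSet(object):
--     """并查集"""
--
--     def __init__(self, data_list):
--         """初始化两个字典，一个保存节点的父节点，另外一个保存父节点的大小
--         初始化的时候，将节点的父节点设为自身，size设为1"""
--         self.father_dict = {}
--         self.size_dict = {}
--
--         for node in data_list:
--             self.father_dict[node] = node
--             self.size_dict[node] = 1
--
--     def find(self, node):
--         """使用递归的方式来查找父节点
--
--         在查找父节点的时候，顺便把当前节点移动到父节点上面
--         这个操作算是一个优化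
--         """
--         father = self.father_dict[node]
--         if node != father:
--             if father != self.father_dict[father]:  # 在降低树高优化时，确保父节点大小字典正确
--                 self.size_dict[father] -= 1
--             father = self.find(father)
--         self.father_dict[node] = father
--         return father
--
--     def is_same_set(self, node_a, node_b):
--         """查看两个节点是不是在一个集合里面"""
--         return self.find(node_a) == self.find(node_b)
--
--     def union(self, node_a, node_b):
--         """将两个集合合并在一起"""
--         if node_a is None or node_b is None:
--             return
--
--         a_head = self.find(node_a)
--         b_head = self.find(node_b)
--
--         if a_head != b_head:
--             a_set_size = self.size_dict[a_head]
--             b_set_size = self.size_dict[b_head]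
--             if a_set_size >= b_set_size:
--                 self.father_dict[b_head] = a_head
--                 self.size_dict[a_head] = a_set_size + b_set_size
--             else:
--                 self.father_dict[a_head] = b_head
--                 self.size_dict[b_head] = a_set_size + b_set_size
--
-- def group_walls(walls):
--     tuple_walls = []
--     tuple_point_set = set()
--     for wall in walls:
--         p0, p1 = wall
--         p0, p1 = (p0[0], p0[1]), (p1[0], p1[1])
--         tuple_walls.append((p0, p1))
--         tuple_point_set.add(p0)
--         tuple_point_set.add(p1)
--
--     ufs = UnionFindSet(list(tuple_point_set))
--
--     for wall in tuple_walls: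
--         p0, p1 = wall
--         ufs.union(p0, p1)
--
--     cnt = 0
--     father2idx = dict()
--     result = []
--     for wall in tuple_walls:
--         father = ufs.find(wall[0])
--         if father not in father2idx:
--             father2idx[father] = cnt
--             result.append([])
--             cnt += 1
--         result[father2idx[father]].append(wall)
--     return [i for i in result if len(i) >= 4], [i[0] for i in result if len(i) == 1]
-- ===== SOURCE B (Python) =====
-- def group_walls(walls):
--     tuple_walls = [((w[0][0], w[0][1]), (w[1][0], w[1][1])) for w in walls]
--     # maintain the partition of points directly: a list of disjoint point sets,
--     # merging the two sets touched by each wall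
--     classes = []
--
--     def locate(p):
--         for i, c in enumerate(classes):
--             if p in c:
--                 return i
--         return None
--
--     for p0, p1 in tuple_walls:
--         i, j = locate(p0), locate(p1)
--         if i is None and j is None:
--             classes.append({p0, p1})
--         elif i is None:
--             classes[j].add(p0)
--         elif j is None:
--             classes[i].add(p1)
--         elif i != j:
--             lo, hi = min(i, j), max(i, j)
--             classes[lo] |= classes[hi]
--             del classes[hi]
--
--     idx_of = {}
--     result = []
--     for w in tuple_walls:
--         c = locate(w[0])
--         if c not in idx_of:
--             idx_of[c] = len(result)
--             result.append([])
--         result[idx_of[c]].append(w)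
--     return [g for g in result if len(g) >= 4], [g[0] for g in result if len(g) == 1]
-- ===== Notes on version B (the rewrite author's own statement) =====
-- stated objective: simpler
-- what changed: Replaces the union-find structure (recursive find with path compression, size bookkeeping, union by size) with a directly maintained partition: a list of disjoint endpoint sets, merging the two sets touched by each wall, and grouping walls by the index of their first endpoint's set.
import Mathlib
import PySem

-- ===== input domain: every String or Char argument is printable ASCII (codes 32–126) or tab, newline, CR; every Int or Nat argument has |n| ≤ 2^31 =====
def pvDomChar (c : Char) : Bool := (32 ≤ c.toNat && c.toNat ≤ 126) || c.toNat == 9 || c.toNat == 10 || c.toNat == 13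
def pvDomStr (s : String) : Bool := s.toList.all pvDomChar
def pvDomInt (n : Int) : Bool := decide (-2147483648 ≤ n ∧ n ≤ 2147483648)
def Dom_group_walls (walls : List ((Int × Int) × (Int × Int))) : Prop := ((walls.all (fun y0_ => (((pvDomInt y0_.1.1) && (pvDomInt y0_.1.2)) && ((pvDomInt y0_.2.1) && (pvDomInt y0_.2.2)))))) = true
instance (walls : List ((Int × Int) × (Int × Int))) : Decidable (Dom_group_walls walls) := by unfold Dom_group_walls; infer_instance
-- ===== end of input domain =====

-- B replaces the union-find structure (path compression + union by size) by a direct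
-- partition of endpoints into merged point-sets; objective: simpler, same observable result.

-- ===== PORT A =====
-- UnionFindSet.find: fuel-bounded structural recursion (fuel = number of points always
-- B replaces the union-find structure (path compression + union by size) with a directly
-- maintained partition: a list of disjoint endpoint sets merged per wall; objective: simpler.
-- ===== PORT A =====
-- UnionFindSet.find: fuel-bounded structural recursion (fuel = number of points always
-- suffices on the inputs reached from group_walls; the fuel-0 branch is a totality guard).
def pvFindA (fuel : Nat) (f : PySem.Dict (Int × Int) (Int × Int))
    (s : PySem.Dict (Int × Int) Int) (node : Int × Int) :
    (Int × Int) × PySem.Dict (Int × Int) (Int × Int) × PySem.Dict (Int × Int) Int :=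
  match fuel with
  | 0 => (node, f, s)
  | fuel + 1 =>
    let father := f.getD node node
    if node ≠ father then
      let s1 := if father ≠ f.getD father father then s.modify father 0 (fun v => v - 1) else s
      let res := pvFindA fuel f s1 father
      (res.1, res.2.1.insert node res.1, res.2.2)
    else
      (father, f.insert node father, s)

-- UnionFindSet.union (the `is None` guard is dead code for tuple nodes)
def pvUnionA (fuel : Nat) (f : PySem.Dict (Int × Int) (Int × Int))
    (s : PySem.Dict (Int × Int) Int) (a b : Int × Int) :
    PySem.Dict (Int × Int) (Int × Int) × PySem.Dict (Int × Int) Int :=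
  let r1 := pvFindA fuel f s a
  let r2 := pvFindA fuel r1.2.1 r1.2.2 b
  let aHead := r1.1
  let bHead := r2.1
  let f2 := r2.2.1
  let s2 := r2.2.2
  if aHead ≠ bHead then
    let aSize := s2.getD aHead 0
    let bSize := s2.getD bHead 0
    if bSize ≤ aSize then (f2.insert bHead aHead, s2.insert aHead (aSize + bSize))
    else (f2.insert aHead bHead, s2.insert bHead (aSize + bSize))
  else (f2, s2)

-- first loop body: build tuple_walls and the point set
def pvCollectA (st : List ((Int × Int) × (Int × Int)) × PySem.Set (Int × Int))
    (w : (Int × Int) × (Int × Int)) :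
    List ((Int × Int) × (Int × Int)) × PySem.Set (Int × Int) :=
  let p0 := (w.1.1, w.1.2)
  let p1 := (w.2.1, w.2.2)
  (st.1 ++ [(p0, p1)], PySem.Set.add (PySem.Set.add st.2 p0) p1)

-- UnionFindSet.__init__ loop body
def pvInitA (d : PySem.Dict (Int × Int) (Int × Int) × PySem.Dict (Int × Int) Int)
    (p : Int × Int) : PySem.Dict (Int × Int) (Int × Int) × PySem.Dict (Int × Int) Int :=
  (d.1.insert p p, d.2.insert p (1 : Int))

-- union loop body
def pvUnionStep (fuel : Nat)
    (fs : PySem.Dict (Int × Int) (Int × Int) × PySem.Dict (Int × Int) Int)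
    (w : (Int × Int) × (Int × Int)) :
    PySem.Dict (Int × Int) (Int × Int) × PySem.Dict (Int × Int) Int :=
  pvUnionA fuel fs.1 fs.2 w.1 w.2

-- grouping loop body (state: father dict, size dict, cnt, father2idx, result)
def pvStep3A (fuel : Nat)
    (st : PySem.Dict (Int × Int) (Int × Int) × PySem.Dict (Int × Int) Int × Int ×
      PySem.Dict (Int × Int) Int × List (List ((Int × Int) × (Int × Int))))
    (w : (Int × Int) × (Int × Int)) :
    PySem.Dict (Int × Int) (Int × Int) × PySem.Dict (Int × Int) Int × Int ×
      PySem.Dict (Int × Int) Int × List (List ((Int × Int) × (Int × Int))) :=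
  let fr := pvFindA fuel st.1 st.2.1 w.1
  let father := fr.1
  let f' := fr.2.1
  let s' := fr.2.2
  let cnt := st.2.2.1
  let f2i := st.2.2.2.1
  let result := st.2.2.2.2
  let upd := if ¬ f2i.contains father then (cnt + 1, f2i.insert father cnt, result ++ [[]])
             else (cnt, f2i, result)
  (f', s', upd.1, upd.2.1,
    upd.2.2.modify (upd.2.1.getD father 0).toNat (fun g => g ++ [w]))

def group_walls (walls : List ((Int × Int) × (Int × Int))) : (List (List ((Int × Int) × (Int × Int)))) × (List ((Int × Int) × (Int × Int))) :=
  let tp := walls.foldl pvCollectA ([], PySem.Set.empty)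
  let tupleWalls := tp.1
  let points := tp.2
  let ds := points.foldl pvInitA (PySem.Dict.empty, PySem.Dict.empty)
  let fuel := points.length
  let fs := tupleWalls.foldl (pvUnionStep fuel) ds
  let st := tupleWalls.foldl (pvStep3A fuel) (fs.1, fs.2, (0 : Int), PySem.Dict.empty, [])
  let result := st.2.2.2.2
  (result.filter (fun g => decide (4 ≤ g.length)),
   (result.filter (fun g => decide (g.length = 1))).map (fun g => g.headD ((0, 0), (0, 0))))

-- ===== PORT B =====
-- Source B locate: first index of the class containing p (None if absent)
def pvLocate (classes : List (PySem.Set (Int × Int))) (p : Int × Int) : Option Nat :=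
  match classes with
  | [] => none
  | c :: rest => if PySem.Set.contains c p then some 0 else (pvLocate rest p).map (· + 1)

-- Source B per-wall partition update
def pvStepB (classes : List (PySem.Set (Int × Int))) (w : (Int × Int) × (Int × Int)) :
    List (PySem.Set (Int × Int)) :=
  match pvLocate classes w.1, pvLocate classes w.2 with
  | none, none => classes ++ [PySem.Set.ofList [w.1, w.2]]
  | none, some j => classes.modify j (fun c => PySem.Set.add c w.1)
  | some i, none => classes.modify i (fun c => PySem.Set.add c w.2)
  | some i, some j =>
    if i ≠ j then
      (classes.modify (min i j) (fun c => PySem.Set.union c (classes.getD (max i j) PySem.Set.empty))).eraseIdx (max i j)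
    else classes

-- Source B final grouping loop body
def pvStep3B (classes : List (PySem.Set (Int × Int)))
    (st : PySem.Dict (Option Nat) Int × List (List ((Int × Int) × (Int × Int))))
    (w : (Int × Int) × (Int × Int)) :
    PySem.Dict (Option Nat) Int × List (List ((Int × Int) × (Int × Int))) :=
  let c := pvLocate classes w.1
  let idxOf := st.1
  let result := st.2
  let upd := if ¬ idxOf.contains c then (idxOf.insert c (result.length : Int), result ++ [[]])
             else (idxOf, result)
  (upd.1, upd.2.modify (upd.1.getD c 0).toNat (fun g => g ++ [w]))

def group_walls_alt (walls : List ((Int × Int) × (Int × Int))) : (List (List ((Int × Int) × (Int × Int)))) × (List ((Int × Int) × (Int × Int))) :=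
  let tupleWalls := walls.map (fun w => ((w.1.1, w.1.2), (w.2.1, w.2.2)))
  let classes := tupleWalls.foldl pvStepB []
  let st := tupleWalls.foldl (pvStep3B classes) ((PySem.Dict.empty : PySem.Dict (Option Nat) Int), [])
  let result := st.2
  (result.filter (fun g => decide (4 ≤ g.length)),
   (result.filter (fun g => decide (g.length = 1))).map (fun g => g.headD ((0, 0), (0, 0))))

-- ===== PRECONDITION & SPEC =====
def Spec_group_walls (walls : List ((Int × Int) × (Int × Int))) (out : (List (List ((Int × Int) × (Int × Int)))) × (List ((Int × Int) × (Int × Int)))) : Prop := out = group_walls_alt walls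
instance (walls : List ((Int × Int) × (Int × Int))) (out : (List (List ((Int × Int) × (Int × Int)))) × (List ((Int × Int) × (Int × Int)))) : Decidable (Spec_group_walls walls out) := by unfold Spec_group_walls; infer_instance

-- ===== CLAIM (what is proved, stated in full; the proofs are below) =====
def Claim_equal_group_walls : Prop := ∀ (walls : List ((Int × Int) × (Int × Int))), Dom_group_walls walls → Spec_group_walls walls (group_walls walls)

-- ===== LEMMAS AND PROOFS =====
abbrev PvPt := Int × Int
abbrev PvF := PySem.Dict PvPt PvPt


inductive PvRooted (f : PvF) : PvPt → PvPt → Nat → Prop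
  | root (p : PvPt) (h : f.getD p p = p) : PvRooted f p p 0
  | step (p r : PvPt) (n : Nat) (hne : f.getD p p ≠ p)
      (ht : PvRooted f (f.getD p p) r n) : PvRooted f p r (n + 1)

theorem PvRooted.step' {f : PvF} {p q r : PvPt} {n : Nat} (hq : f.getD p p = q)
    (hne : q ≠ p) (ht : PvRooted f q r n) : PvRooted f p r (n + 1) := by
  subst hq; exact .step p r n hne ht

theorem pvRooted_fix {f : PvF} {p r : PvPt} {n : Nat} (h : PvRooted f p r n) :
    f.getD r r = r := by
  induction h with
  | root p h => exact h
  | step p r n hne ht ih => exact ih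

theorem pvRooted_unique {f : PvF} {p r r' : PvPt} {n n' : Nat}
    (h : PvRooted f p r n) (h' : PvRooted f p r' n') : r = r' ∧ n = n' := by
  induction h generalizing r' n' with
  | root p hp =>
    cases h' with
    | root _ _ => exact ⟨rfl, rfl⟩
    | step _ _ _ hne _ => exact absurd hp hne
  | step p r n hne ht ih =>
    cases h' with
    | root _ hp => exact absurd hp hne
    | step _ _ m _ ht' =>
      obtain ⟨h1, h2⟩ := ih ht'
      exact ⟨h1, by omega⟩

theorem pvRooted_congr {f f' : PvF} (hg : ∀ q, f'.getD q q = f.getD q q)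
    {p r : PvPt} {n : Nat} (h : PvRooted f p r n) : PvRooted f' p r n := by
  induction h with
  | root p hp => exact .root p (by rw [hg]; exact hp)
  | step p r n hne ht ih => exact .step' (q := f.getD p p) (hg p) hne ih

-- path compression: inserting a ↦ (root of a) shortens chains but preserves every root
theorem pvRooted_insert_root {f : PvF} {a r : PvPt} {na : Nat} (ha : PvRooted f a r na)
    {p r' : PvPt} {n : Nat} (h : PvRooted f p r' n) :
    ∃ n' ≤ n, PvRooted (f.insert a r) p r' n' := by
  induction h with
  | root q hq =>
    refine ⟨0, le_refl _, .root q ?_⟩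
    rw [PySem.Dict.getD_insert]
    split
    · next heq =>
      subst heq
      exact (pvRooted_unique ha (.root q hq)).1
    · exact hq
  | step q r2 m hne ht ih =>
    by_cases hqa : q = a
    · subst hqa
      obtain ⟨hr, hn⟩ := pvRooted_unique ha (.step q r2 m hne ht)
      subst hr
      by_cases hqr : q = r
      · exact absurd (by rw [hqr]; exact pvRooted_fix ha) hne
      · refine ⟨1, by omega, .step' (q := r) ?_ (fun h => hqr h.symm) (.root r ?_)⟩
        · rw [PySem.Dict.getD_insert, if_pos rfl]
        · rw [PySem.Dict.getD_insert, if_neg (fun h => hqr h.symm)]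
          exact pvRooted_fix ha
    · obtain ⟨m', hm', hm⟩ := ih
      refine ⟨m' + 1, by omega, ?_⟩
      have hget : (f.insert a r).getD q q = f.getD q q := by
        rw [PySem.Dict.getD_insert, if_neg hqa]
      exact .step' hget (by rw [← hget] at hne ⊢; exact fun h => hne h) hm

-- linking root a under root b
theorem pvRooted_link {f : PvF} {a b : PvPt} (ha : f.getD a a = a) (hb : f.getD b b = b)
    (hab : a ≠ b) {p r : PvPt} {n : Nat} (h : PvRooted f p r n) :
    (r = a → PvRooted (f.insert a b) p b (n + 1)) ∧ (r ≠ a → PvRooted (f.insert a b) p r n) := by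
  have hgb : (f.insert a b).getD b b = b := by
    rw [PySem.Dict.getD_insert, if_neg (Ne.symm hab)]; exact hb
  induction h with
  | root q hq =>
    constructor
    · rintro rfl
      refine .step' (q := b) ?_ (Ne.symm hab) (.root b hgb)
      rw [PySem.Dict.getD_insert, if_pos rfl]
    · intro hqa
      refine .root q ?_
      rw [PySem.Dict.getD_insert, if_neg hqa]; exact hq
  | step q r2 m hne ht ih =>
    have hqa : q ≠ a := by
      intro hq
      exact hne (by rw [hq]; exact ha)
    have hget : (f.insert a b).getD q q = f.getD q q := by
      rw [PySem.Dict.getD_insert, if_neg hqa]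
    have hne' : f.getD q q ≠ q := hne
    constructor
    · rintro rfl
      exact .step' hget hne' (ih.1 rfl)
    · intro hr
      exact .step' hget hne' (ih.2 hr)

-- find: returns the root and only shortens chains (all roots preserved)
theorem pvFind_spec : ∀ (fuel : Nat) (f : PvF) (s : PySem.Dict PvPt Int) (p r : PvPt) (n : Nat),
    PvRooted f p r n → n < fuel →
    (pvFindA fuel f s p).1 = r ∧
      ∀ q r' m, PvRooted f q r' m → ∃ m' ≤ m, PvRooted (pvFindA fuel f s p).2.1 q r' m' := by
  intro fuel
  induction fuel with
  | zero => intro _ _ _ _ n _ hn; omega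
  | succ fuel ih =>
    intro f s p r n h hn
    simp only [pvFindA]
    by_cases hne : p ≠ f.getD p p
    · simp only [if_pos hne]
      cases h with
      | root _ hp => exact absurd hp.symm hne
      | step _ _ m hstep ht =>
        have hm : m < fuel := by omega
        obtain ⟨ih1, ih2⟩ := ih f (if f.getD p p ≠ f.getD (f.getD p p) (f.getD p p) then
            s.modify (f.getD p p) 0 (fun v => v - 1) else s) (f.getD p p) r m ht hm
        refine ⟨ih1, ?_⟩
        intro q r' k hk
        obtain ⟨k', hk', hkk⟩ := ih2 q r' k hk
        obtain ⟨np, hnp, hp⟩ := ih2 p r (m + 1) (.step p r m hstep ht)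
        obtain ⟨k'', hk'', h2⟩ := pvRooted_insert_root (ih1 ▸ hp) hkk
        exact ⟨k'', by omega, h2⟩
    · simp only [if_neg hne]
      push_neg at hne
      cases h with
      | root _ hp =>
        refine ⟨hp, ?_⟩
        intro q r' m hm
        refine ⟨m, le_refl _, pvRooted_congr (fun x => ?_) hm⟩
        rw [PySem.Dict.getD_insert]
        split
        · next heq => subst heq; rfl
        · rfl
      | step _ _ m hstep ht => exact absurd hne.symm hstep




def PvCov (C : List (List PvPt)) (p : PvPt) : Prop := ∃ c ∈ C, p ∈ c

def PvDisj (C : List (List PvPt)) : Prop := C.Pairwise (fun c d => ∀ x ∈ c, x ∉ d)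

def PvInv (P : List PvPt) (C : List (List PvPt)) (f : PvF) : Prop :=
  (∀ p, ¬ PvCov C p → f.getD p p = p) ∧
  (∀ c ∈ C, c.Nodup ∧ c ≠ [] ∧ ∀ x ∈ c, x ∈ P) ∧
  PvDisj C ∧
  (∀ c ∈ C, ∃ r ∈ c, ∀ p ∈ c, ∃ n, PvRooted f p r n ∧ n < c.length)

theorem pvRooted_zero {f : PvF} {p r : PvPt} (h : PvRooted f p r 0) :
    r = p ∧ f.getD p p = p := by cases h; exact ⟨rfl, by assumption⟩

theorem pvInv_mono {f f' : PvF}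
    (hpres : ∀ q r m, PvRooted f q r m → ∃ m' ≤ m, PvRooted f' q r m')
    {P : List PvPt} {C : List (List PvPt)} (hI : PvInv P C f) : PvInv P C f' := by
  obtain ⟨h1, h2, h3, h4⟩ := hI
  refine ⟨?_, h2, h3, ?_⟩
  · intro p hp
    obtain ⟨m', hm', h⟩ := hpres p p 0 (.root p (h1 p hp))
    have : m' = 0 := by omega
    subst this
    exact (pvRooted_zero h).2
  · intro c hc
    obtain ⟨r, hr, hall⟩ := h4 c hc
    refine ⟨r, hr, fun p hp => ?_⟩
    obtain ⟨n, hn, hb⟩ := hall p hp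
    obtain ⟨m', hm', h⟩ := hpres _ _ _ hn
    exact ⟨m', h, by omega⟩

theorem pvLocate_none_iff (C : List (List PvPt)) (p : PvPt) :
    pvLocate C p = none ↔ ∀ c ∈ C, p ∉ c := by
  induction C with
  | nil => simp [pvLocate]
  | cons c rest ih =>
    simp only [pvLocate]
    by_cases h : p ∈ c
    · have hc : PySem.Set.contains c p = true := (PySem.Set.contains_iff c p).mpr h
      simp [h]
    · have hc : PySem.Set.contains c p = false := by
        rw [Bool.eq_false_iff]
        exact fun hh => h ((PySem.Set.contains_iff c p).mp hh)
      simp [h, ih]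

theorem pvLocate_some {C : List (List PvPt)} {p : PvPt} {i : Nat}
    (h : pvLocate C p = some i) : ∃ hlt : i < C.length, p ∈ C[i] := by
  induction C generalizing i with
  | nil => simp [pvLocate] at h
  | cons c rest ih =>
    simp only [pvLocate] at h
    by_cases hc : PySem.Set.contains c p
    · rw [if_pos hc] at h
      obtain rfl : i = 0 := by simpa using h.symm
      exact ⟨by simp, by simpa using (PySem.Set.contains_iff c p).mp hc⟩
    · rw [if_neg hc] at h
      obtain ⟨j, hj, rfl⟩ := Option.map_eq_some_iff.mp h
      obtain ⟨hlt, hmem⟩ := ih hj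
      exact ⟨by simpa using hlt, by simpa using hmem⟩

theorem pvLocate_of_mem {C : List (List PvPt)} {p : PvPt} (hd : PvDisj C)
    {i : Nat} (hlt : i < C.length) (hp : p ∈ C[i]) : pvLocate C p = some i := by
  induction C generalizing i with
  | nil => simp at hlt
  | cons c rest ih =>
    match i with
    | 0 =>
      have hp0 : p ∈ c := by simpa using hp
      have hcp : PySem.Set.contains c p = true := (PySem.Set.contains_iff c p).mpr hp0
      simp [pvLocate, hp0]
    | i + 1 =>
      have hlt' : i < rest.length := by simpa using hlt
      have hpr : p ∈ rest[i] := by simpa using hp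
      have hpc : p ∉ c := by
        intro hc
        have := (List.pairwise_cons.mp hd).1 rest[i] (by simp) p hc
        exact this hpr
      have hc : PySem.Set.contains c p = false := by
        rw [Bool.eq_false_iff]
        exact fun hh => hpc ((PySem.Set.contains_iff c p).mp hh)
      simp only [pvLocate, hc, Bool.false_eq_true, if_false]
      rw [ih (List.pairwise_cons.mp hd).2 hlt' hpr]
      rfl

theorem pvDisj_getElem {C : List (List PvPt)} (hd : PvDisj C) {i j : Nat}
    (hi : i < C.length) (hj : j < C.length) (hne : i ≠ j) {x : PvPt}
    (hx : x ∈ C[i]) : x ∉ C[j] := by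
  rw [PvDisj, List.pairwise_iff_getElem] at hd
  rcases Nat.lt_or_ge i j with h | h
  · exact hd i j hi hj h x hx
  · have hji : j < i := by omega
    intro hxj
    exact hd j i hj hi hji x hxj hx

theorem pvOfList2 (a b : PvPt) :
    PySem.Set.ofList [a, b] = if b = a then [a] else [a, b] := by
  simp [PySem.Set.ofList_eq_foldl, PySem.Set.add_eq_ite]

theorem pvUnion_disjoint : ∀ (t s : List PvPt), t.Nodup → (∀ x ∈ t, x ∉ s) →
    PySem.Set.union s t = s ++ t := by
  intro t
  induction t with
  | nil => intro s _ _; simp [PySem.Set.union, PySem.Set.update]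
  | cons a t ih =>
    intro s hnd hdisj
    have h1 : PySem.Set.add s a = s ++ [a] :=
      PySem.Set.add_of_not_mem (hdisj a (by simp))
    have : PySem.Set.union s (a :: t) = PySem.Set.union (s ++ [a]) t := by
      simp [PySem.Set.union, PySem.Set.update, h1]
    rw [this, ih (s ++ [a]) (List.nodup_cons.mp hnd).2]
    · simp
    · intro x hx
      simp only [List.mem_append, List.mem_singleton]
      rintro (hxs | rfl)
      · exact hdisj x (by simp [hx]) hxs
      · exact (List.nodup_cons.mp hnd).1 hx

theorem pvRooted_link_of_ne {f : PvF} {a b : PvPt} (ha : f.getD a a = a)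
    {p r : PvPt} {n : Nat} (h : PvRooted f p r n) (hr : r ≠ a) :
    PvRooted (f.insert a b) p r n := by
  induction h with
  | root q hq =>
    exact .root q (by rw [PySem.Dict.getD_insert, if_neg hr]; exact hq)
  | step q r2 m hne ht ih =>
    have hqa : q ≠ a := fun hq => hne (by rw [hq]; exact ha)
    have hget : (f.insert a b).getD q q = f.getD q q := by
      rw [PySem.Dict.getD_insert, if_neg hqa]
    exact .step' hget hne (ih hr)

-- the post-link invariant, given pre-link chain data
theorem pvInv_link {P : List PvPt} {C' : List (List PvPt)} {f2 : PvF} {child parent : PvPt}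
    (hne : child ≠ parent)
    (hcc : f2.getD child child = child) (hpp : f2.getD parent parent = parent)
    (hI1 : ∀ p, ¬ PvCov C' p → f2.getD p p = p ∧ p ≠ child)
    (hwf : ∀ c ∈ C', c.Nodup ∧ c ≠ [] ∧ ∀ x ∈ c, x ∈ P)
    (hd : PvDisj C')
    (hch : ∀ c ∈ C', ∃ r ∈ c, r ≠ child ∧ ∀ p ∈ c, ∃ n,
      (PvRooted f2 p r n ∧ n < c.length) ∨
      (r = parent ∧ PvRooted f2 p child n ∧ n + 1 < c.length)) :
    PvInv P C' (f2.insert child parent) := by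
  refine ⟨?_, hwf, hd, ?_⟩
  · intro p hp
    obtain ⟨h1, h2⟩ := hI1 p hp
    rw [PySem.Dict.getD_insert, if_neg h2]
    exact h1
  · intro c hc
    obtain ⟨r, hr, hrc, hall⟩ := hch c hc
    refine ⟨r, hr, fun p hp => ?_⟩
    rcases hall p hp with ⟨n, ⟨hn, hb⟩ | ⟨rfl, hn, hb⟩⟩
    · exact ⟨n, pvRooted_link_of_ne hcc hn hrc, hb⟩
    · exact ⟨n + 1, (pvRooted_link hcc hpp hne hn).1 rfl, hb⟩

theorem pvRoot_of_endpoint {P : List PvPt} {C : List (List PvPt)} {f : PvF}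
    (hI : PvInv P C f) (hPn : P.Nodup) {p : PvPt} (hp : p ∈ P) :
    ∃ r n, PvRooted f p r n ∧ n < P.length ∧
      ((pvLocate C p = none ∧ r = p) ∨
       (∃ i, ∃ hlt : i < C.length, pvLocate C p = some i ∧ r ∈ C[i] ∧
          ∀ q ∈ C[i], ∃ m, PvRooted f q r m ∧ m < (C[i]).length)) := by
  by_cases hcov : PvCov C p
  · obtain ⟨c, hc, hpc⟩ := hcov
    obtain ⟨i, hlt, rfl⟩ := List.mem_iff_getElem.mp hc
    obtain ⟨r, hr, hall⟩ := hI.2.2.2 _ (List.getElem_mem hlt)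
    obtain ⟨n, hn, hb⟩ := hall p hpc
    have hwf := hI.2.1 _ (List.getElem_mem hlt)
    have hsub : (C[i]).length ≤ P.length :=
      (List.subperm_of_subset hwf.1 (fun x hx => hwf.2.2 x hx)).length_le
    exact ⟨r, n, hn, by omega, Or.inr ⟨i, hlt, pvLocate_of_mem hI.2.2.1 hlt hpc, hr, hall⟩⟩
  · have hfix := hI.1 p hcov
    have hnone : pvLocate C p = none :=
      (pvLocate_none_iff C p).mpr (fun c hc hpc => hcov ⟨c, hc, hpc⟩)
    exact ⟨p, 0, .root p hfix, List.length_pos_of_mem hp, Or.inl ⟨hnone, rfl⟩⟩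

theorem pvCov_append {C : List (List PvPt)} {c0 : List PvPt} {p : PvPt} :
    PvCov (C ++ [c0]) p ↔ PvCov C p ∨ p ∈ c0 := by
  constructor
  · rintro ⟨c, hc, hp⟩
    rcases List.mem_append.mp hc with h | h
    · exact .inl ⟨c, h, hp⟩
    · rw [List.mem_singleton] at h
      subst h
      exact .inr hp
  · rintro (⟨c, hc, hp⟩ | hp)
    · exact ⟨c, List.mem_append_left _ hc, hp⟩
    · exact ⟨c0, List.mem_append_right _ (by simp), hp⟩

theorem pvCov_mid {T D : List (List PvPt)} {c : List PvPt} {p : PvPt} :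
    PvCov (T ++ c :: D) p ↔ PvCov T p ∨ p ∈ c ∨ PvCov D p := by
  constructor
  · rintro ⟨cc, hcc, hp⟩
    rcases List.mem_append.mp hcc with h | h
    · exact .inl ⟨cc, h, hp⟩
    · rcases List.mem_cons.mp h with rfl | h
      · exact .inr (.inl hp)
      · exact .inr (.inr ⟨cc, h, hp⟩)
  · rintro (⟨cc, hcc, hp⟩ | hp | ⟨cc, hcc, hp⟩)
    · exact ⟨cc, List.mem_append_left _ hcc, hp⟩
    · exact ⟨c, List.mem_append_right _ (by simp), hp⟩
    · exact ⟨cc, List.mem_append_right _ (List.mem_cons_of_mem _ hcc), hp⟩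

theorem pvDecomp {C : List (List PvPt)} {j : Nat} (hj : j < C.length) :
    C = C.take j ++ C[j] :: C.drop (j + 1) := by
  rw [List.getElem_cons_drop, List.take_append_drop]

theorem pvSetMid (T D : List (List PvPt)) (c x : List PvPt) :
    (T ++ c :: D).set T.length x = T ++ x :: D := by
  induction T with
  | nil => simp
  | cons a T ih => simp [List.set, ih]

theorem pvLen_take {C : List (List PvPt)} {j : Nat} (hj : j < C.length) :
    (C.take j).length = j := by
  simp [List.length_take]
  omega

theorem pvSetAt {C : List (List PvPt)} {j : Nat} (hj : j < C.length) (x : List PvPt) :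
    C.set j x = C.take j ++ x :: C.drop (j + 1) :=
  List.set_eq_take_cons_drop x hj

theorem pvDisj_mid {T D : List (List PvPt)} {c u : List PvPt}
    (hd : PvDisj (T ++ c :: D))
    (hu : ∀ x ∈ u, x ∈ c ∨ ¬ PvCov (T ++ c :: D) x) :
    PvDisj (T ++ u :: D) := by
  rw [PvDisj, List.pairwise_append, List.pairwise_cons] at hd ⊢
  obtain ⟨hdT, ⟨hcD, hdD⟩, hcross⟩ := hd
  refine ⟨hdT, ⟨?_, hdD⟩, ?_⟩
  · intro d hdmem x hx
    rcases hu x hx with hxc | hxun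
    · exact hcD d hdmem x hxc
    · intro hxd
      exact hxun ⟨d, List.mem_append_right _ (List.mem_cons_of_mem _ hdmem), hxd⟩
  · intro a ha b hb x hxa
    rcases List.mem_cons.mp hb with rfl | hbD
    · intro hxu
      rcases hu x hxu with hxc | hxun
      · exact hcross a ha c (List.mem_cons_self ..) x hxa hxc
      · exact hxun ⟨a, List.mem_append_left _ ha, hxa⟩
    · exact hcross a ha b (List.mem_cons_of_mem _ hbD) x hxa

theorem pvDisj_merge {T M D : List (List PvPt)} {c1 c2 u : List PvPt}
    (hd : PvDisj (T ++ c1 :: (M ++ c2 :: D)))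
    (hu : ∀ x ∈ u, x ∈ c1 ∨ x ∈ c2) :
    PvDisj (T ++ u :: (M ++ D)) := by
  obtain ⟨pT, prest, crossT⟩ := List.pairwise_append.mp hd
  obtain ⟨hc1rest, p2⟩ := List.pairwise_cons.mp prest
  obtain ⟨pM, pc2D, crossM⟩ := List.pairwise_append.mp p2
  obtain ⟨hc2D, pD⟩ := List.pairwise_cons.mp pc2D
  refine List.pairwise_append.mpr ⟨pT, List.pairwise_cons.mpr ⟨?_, List.pairwise_append.mpr ⟨pM, pD, ?_⟩⟩, ?_⟩
  · intro b hb x hx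
    rcases hu x hx with hx1 | hx2
    · rcases List.mem_append.mp hb with hbM | hbD
      · exact hc1rest b (List.mem_append_left _ hbM) x hx1
      · exact hc1rest b (List.mem_append_right _ (List.mem_cons_of_mem _ hbD)) x hx1
    · rcases List.mem_append.mp hb with hbM | hbD
      · intro hxb
        exact crossM b hbM c2 (List.mem_cons_self ..) x hxb hx2
      · exact hc2D b hbD x hx2
  · intro a ha b hb
    exact crossM a ha b (List.mem_cons_of_mem _ hb)
  · intro a ha b hb x hxa
    rcases List.mem_cons.mp hb with rfl | hb
    · intro hxu
      rcases hu x hxu with hx1 | hx2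
      · exact crossT a ha c1 (List.mem_cons_self ..) x hxa hx1
      · exact crossT a ha c2
          (List.mem_cons_of_mem _ (List.mem_append_right _ (List.mem_cons_self ..))) x hxa hx2
    · rcases List.mem_append.mp hb with hbM | hbD
      · exact crossT a ha b (List.mem_cons_of_mem _ (List.mem_append_left _ hbM)) x hxa
      · exact crossT a ha b
          (List.mem_cons_of_mem _ (List.mem_append_right _ (List.mem_cons_of_mem _ hbD))) x hxa

theorem pvTakeDec {C : List (List PvPt)} {lo hi : Nat} (hlo : lo < C.length) (hlh : lo < hi) :
    C.take hi = C.take lo ++ C[lo] :: (C.take hi).drop (lo + 1) := by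
  have hlt : lo < (C.take hi).length := by
    simp [List.length_take]
    omega
  have h := pvDecomp hlt
  rw [List.getElem_take, List.take_take, min_eq_left (le_of_lt hlh)] at h
  exact h

theorem pvDecomp2 {C : List (List PvPt)} {lo hi : Nat} (hlo : lo < C.length)
    (hhi : hi < C.length) (hlh : lo < hi) :
    C = C.take lo ++ C[lo] :: ((C.take hi).drop (lo + 1) ++ C[hi] :: C.drop (hi + 1)) := by
  conv_lhs => rw [pvDecomp hhi]
  conv_lhs => rw [pvTakeDec hlo hlh]
  simp

theorem pvSetErase {C : List (List PvPt)} {lo hi : Nat} (hlo : lo < C.length)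
    (hhi : hi < C.length) (hlh : lo < hi) (u : List PvPt) :
    (C.set lo u).eraseIdx hi
      = C.take lo ++ u :: ((C.take hi).drop (lo + 1) ++ C.drop (hi + 1)) := by
  rw [List.eraseIdx_eq_take_drop_succ, List.take_set, List.drop_set_of_lt (by omega)]
  conv_lhs => rw [pvTakeDec hlo hlh]
  have hset := pvSetMid (C.take lo) ((C.take hi).drop (lo + 1)) (C[lo]) u
  rw [pvLen_take hlo] at hset
  rw [hset]
  simp

theorem pvMerge_core {P : List PvPt} {T M D : List (List PvPt)} {c1 c2 : List PvPt} {f2 : PvF}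
    (hI2 : PvInv P (T ++ c1 :: (M ++ c2 :: D)) f2)
    {rx ry : PvPt} (hrx : rx ∈ c1) (hry : ry ∈ c2)
    (hallx : ∀ q ∈ c1, ∃ m, PvRooted f2 q rx m ∧ m < c1.length)
    (hally : ∀ q ∈ c2, ∃ m, PvRooted f2 q ry m ∧ m < c2.length)
    (hxy : rx ≠ ry)
    {child parent : PvPt} (hcp : (rx = child ∧ ry = parent) ∨ (ry = child ∧ rx = parent)) :
    PvInv P (T ++ (c1 ++ c2) :: (M ++ D)) (f2.insert child parent) ∧
    (∀ p, PvCov (T ++ c1 :: (M ++ c2 :: D)) p → PvCov (T ++ (c1 ++ c2) :: (M ++ D)) p) := by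
  obtain ⟨hI1, hwf, hd, hch4⟩ := hI2
  obtain ⟨pT, prest, crossT⟩ := List.pairwise_append.mp hd
  obtain ⟨hc1rest, p2⟩ := List.pairwise_cons.mp prest
  obtain ⟨pM, pc2D, crossM⟩ := List.pairwise_append.mp p2
  obtain ⟨hc2D, pD⟩ := List.pairwise_cons.mp pc2D
  have hc1mem : c1 ∈ T ++ c1 :: (M ++ c2 :: D) := List.mem_append_right _ (List.mem_cons_self ..)
  have hc2mem : c2 ∈ T ++ c1 :: (M ++ c2 :: D) :=
    List.mem_append_right _ (List.mem_cons_of_mem _ (List.mem_append_right _ (List.mem_cons_self ..)))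
  have hfixx : f2.getD rx rx = rx := by
    obtain ⟨m, hm, _⟩ := hallx rx hrx
    exact pvRooted_fix hm
  have hfixy : f2.getD ry ry = ry := by
    obtain ⟨m, hm, _⟩ := hally ry hry
    exact pvRooted_fix hm
  have hcc : f2.getD child child = child := by
    rcases hcp with ⟨hc1', _⟩ | ⟨hc1', _⟩
    · rw [← hc1']; exact hfixx
    · rw [← hc1']; exact hfixy
  have hpp : f2.getD parent parent = parent := by
    rcases hcp with ⟨_, hc2'⟩ | ⟨_, hc2'⟩
    · rw [← hc2']; exact hfixy
    · rw [← hc2']; exact hfixx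
  have hne : child ≠ parent := by
    rcases hcp with ⟨hc1', hc2'⟩ | ⟨hc1', hc2'⟩
    · rw [← hc1', ← hc2']; exact hxy
    · rw [← hc1', ← hc2']; exact fun h => hxy h.symm
  have hlen1 : 0 < c1.length := List.length_pos_of_mem hrx
  have hlen2 : 0 < c2.length := List.length_pos_of_mem hry
  have hcov : ∀ p, PvCov (T ++ c1 :: (M ++ c2 :: D)) p → PvCov (T ++ (c1 ++ c2) :: (M ++ D)) p := by
    intro p hp
    rw [pvCov_mid] at hp ⊢
    rcases hp with h | h | h
    · exact .inl h
    · exact .inr (.inl (List.mem_append_left _ h))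
    · rw [pvCov_mid] at h
      rcases h with h | h | h
      · obtain ⟨c, hc, hpc⟩ := h
        exact .inr (.inr ⟨c, List.mem_append_left _ hc, hpc⟩)
      · exact .inr (.inl (List.mem_append_right _ h))
      · obtain ⟨c, hc, hpc⟩ := h
        exact .inr (.inr ⟨c, List.mem_append_right _ hc, hpc⟩)
  refine ⟨⟨?_, ?_, ?_, ?_⟩, hcov⟩
  · intro p hp
    have hpC : ¬ PvCov (T ++ c1 :: (M ++ c2 :: D)) p := fun h => hp (hcov p h)
    have hKid : p ≠ child := by
      rcases hcp with ⟨hc1', _⟩ | ⟨hc1', _⟩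
      · intro hpc
        exact hpC ⟨c1, hc1mem, by rw [hpc, ← hc1']; exact hrx⟩
      · intro hpc
        exact hpC ⟨c2, hc2mem, by rw [hpc, ← hc1']; exact hry⟩
    rw [PySem.Dict.getD_insert, if_neg hKid]
    exact hI1 p hpC
  · intro c hc
    rcases List.mem_append.mp hc with h | h
    · exact hwf c (List.mem_append_left _ h)
    · rcases List.mem_cons.mp h with rfl | h
      · obtain ⟨hn1, hne1, hs1⟩ := hwf c1 hc1mem
        obtain ⟨hn2, hne2, hs2⟩ := hwf c2 hc2mem
        refine ⟨hn1.append hn2 ?_, by simp [hne1], fun x hx => ?_⟩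
        · intro x hx1 hx2
          exact hc1rest c2 (List.mem_append_right _ (List.mem_cons_self ..)) x hx1 hx2
        · rcases List.mem_append.mp hx with hx | hx
          · exact hs1 x hx
          · exact hs2 x hx
      · rcases List.mem_append.mp h with h | h
        · exact hwf c (List.mem_append_right _ (List.mem_cons_of_mem _ (List.mem_append_left _ h)))
        · exact hwf c (List.mem_append_right _ (List.mem_cons_of_mem _
            (List.mem_append_right _ (List.mem_cons_of_mem _ h))))
  · exact pvDisj_merge hd (fun x hx => List.mem_append.mp hx)
  · intro c hc
    rcases List.mem_append.mp hc with h | h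
    · -- c ∈ T
      obtain ⟨r, hr, hall⟩ := hch4 c (List.mem_append_left _ h)
      have hrc1 : r ∉ c1 := crossT c h c1 (List.mem_cons_self ..) r hr
      have hrc2 : r ∉ c2 := crossT c h c2
        (List.mem_cons_of_mem _ (List.mem_append_right _ (List.mem_cons_self ..))) r hr
      have hrchild : r ≠ child := by
        rcases hcp with ⟨hc1', _⟩ | ⟨hc1', _⟩
        · exact fun hR => hrc1 (by rw [hR, ← hc1']; exact hrx)
        · exact fun hR => hrc2 (by rw [hR, ← hc1']; exact hry)
      refine ⟨r, hr, fun p hp => ?_⟩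
      obtain ⟨n, hn, hb⟩ := hall p hp
      exact ⟨n, pvRooted_link_of_ne hcc hn hrchild, hb⟩
    · rcases List.mem_cons.mp h with rfl | h
      · -- the merged class
        rcases hcp with ⟨hc1', hc2'⟩ | ⟨hc1', hc2'⟩
        · refine ⟨ry, List.mem_append_right _ hry, fun p hp => ?_⟩
          rcases List.mem_append.mp hp with hp | hp
          · obtain ⟨m, hm, hb⟩ := hallx p hp
            rw [hc1'] at hm
            refine ⟨m + 1, ?_, by simp; omega⟩
            rw [hc2']
            exact (pvRooted_link hcc hpp hne hm).1 rfl
          · obtain ⟨m, hm, hb⟩ := hally p hp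
            refine ⟨m, ?_, by simp; omega⟩
            exact pvRooted_link_of_ne hcc hm (by rw [← hc1']; exact fun hh => hxy hh.symm)
        · refine ⟨rx, List.mem_append_left _ hrx, fun p hp => ?_⟩
          rcases List.mem_append.mp hp with hp | hp
          · obtain ⟨m, hm, hb⟩ := hallx p hp
            refine ⟨m, ?_, by simp; omega⟩
            exact pvRooted_link_of_ne hcc hm (by rw [← hc1']; exact hxy)
          · obtain ⟨m, hm, hb⟩ := hally p hp
            rw [hc1'] at hm
            refine ⟨m + 1, ?_, by simp; omega⟩
            rw [hc2']
            exact (pvRooted_link hcc hpp hne hm).1 rfl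
      · -- c ∈ M or c ∈ D
        have hcC : c ∈ T ++ c1 :: (M ++ c2 :: D) := by
          rcases List.mem_append.mp h with hM | hD
          · exact List.mem_append_right _ (List.mem_cons_of_mem _ (List.mem_append_left _ hM))
          · exact List.mem_append_right _ (List.mem_cons_of_mem _
              (List.mem_append_right _ (List.mem_cons_of_mem _ hD)))
        obtain ⟨r, hr, hall⟩ := hch4 c hcC
        have hrc1 : r ∉ c1 := by
          intro hrr
          rcases List.mem_append.mp h with hM | hD
          · exact hc1rest c (List.mem_append_left _ hM) r hrr hr
          · exact hc1rest c (List.mem_append_right _ (List.mem_cons_of_mem _ hD)) r hrr hr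
        have hrc2 : r ∉ c2 := by
          intro hrr
          rcases List.mem_append.mp h with hM | hD
          · exact crossM c hM c2 (List.mem_cons_self ..) r hr hrr
          · exact hc2D c hD r hrr hr
        have hrchild : r ≠ child := by
          rcases hcp with ⟨hc1', _⟩ | ⟨hc1', _⟩
          · exact fun hR => hrc1 (by rw [hR, ← hc1']; exact hrx)
          · exact fun hR => hrc2 (by rw [hR, ← hc1']; exact hry)
        refine ⟨r, hr, fun p hp => ?_⟩
        obtain ⟨n, hn, hb⟩ := hall p hp
        exact ⟨n, pvRooted_link_of_ne hcc hn hrchild, hb⟩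

theorem pvUnion_sim {P : List PvPt} {C : List (List PvPt)} {f : PvF}
    (s : PySem.Dict PvPt Int) (w : PvPt × PvPt)
    (hPn : P.Nodup) (h1 : w.1 ∈ P) (h2 : w.2 ∈ P) (hI : PvInv P C f) :
    PvInv P (pvStepB C w) (pvUnionA P.length f s w.1 w.2).1 ∧
    (∀ p, PvCov C p → PvCov (pvStepB C w) p) ∧
    PvCov (pvStepB C w) w.1 ∧ PvCov (pvStepB C w) w.2 := by
  obtain ⟨ra, na, hra, hna, hcaseA⟩ := pvRoot_of_endpoint hI hPn h1
  obtain ⟨F1, hF1⟩ : ∃ F1, pvFindA P.length f s w.1 = F1 := ⟨_, rfl⟩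
  obtain ⟨he1, hpres1⟩ := hF1 ▸ pvFind_spec P.length f s w.1 ra na hra hna
  have hI1 : PvInv P C F1.2.1 := pvInv_mono hpres1 hI
  obtain ⟨rb, nb, hrb, hnb, hcaseB⟩ := pvRoot_of_endpoint hI hPn h2
  obtain ⟨nb', hnb', hrb1⟩ := hpres1 _ _ _ hrb
  obtain ⟨F2, hF2⟩ : ∃ F2, pvFindA P.length F1.2.1 F1.2.2 w.2 = F2 := ⟨_, rfl⟩
  obtain ⟨he2, hpres2⟩ := hF2 ▸ pvFind_spec P.length F1.2.1 F1.2.2 w.2 rb nb' hrb1 (by omega)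
  have hpres12 : ∀ q r m, PvRooted f q r m → ∃ m' ≤ m, PvRooted F2.2.1 q r m' := by
    intro q r m hm
    obtain ⟨m1, hm1, hh1⟩ := hpres1 q r m hm
    obtain ⟨m2, hm2, hh2⟩ := hpres2 q r m1 hh1
    exact ⟨m2, by omega, hh2⟩
  have hI2 : PvInv P C F2.2.1 := pvInv_mono hpres2 hI1
  obtain ⟨na2, hna2, hra2⟩ := hpres12 _ _ _ hra
  obtain ⟨nb2, hnb2, hrb2⟩ := hpres12 _ _ _ hrb
  have hfixa : F2.2.1.getD ra ra = ra := pvRooted_fix hra2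
  have hfixb : F2.2.1.getD rb rb = rb := pvRooted_fix hrb2
  have hUnion : (pvUnionA P.length f s w.1 w.2).1 =
      if ra ≠ rb then
        (if F2.2.2.getD rb 0 ≤ F2.2.2.getD ra 0 then F2.2.1.insert rb ra
         else F2.2.1.insert ra rb)
      else F2.2.1 := by
    by_cases hab : ra = rb
    · simp [pvUnionA, hF1, hF2, he1, he2, hab]
    · by_cases hsz : F2.2.2.getD rb 0 ≤ F2.2.2.getD ra 0
      · simp [pvUnionA, hF1, hF2, he1, he2, hab, hsz]
      · simp [pvUnionA, hF1, hF2, he1, he2, hab, hsz]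
  rw [hUnion]
  clear hUnion hF1 hF2 hpres1 hpres2 he1 he2 hrb1 hI1 hna hnb hnb'
  rcases hcaseA with ⟨hA, rfl⟩ | ⟨i, hilt, hA, hraI, hallA⟩ <;>
    rcases hcaseB with ⟨hB, rfl⟩ | ⟨j, hjlt, hB, hrbJ, hallB⟩
  · -- both endpoints uncovered
    simp only [pvStepB, hA, hB]
    have hcov1 : ¬ PvCov C w.1 := fun hc => by
      obtain ⟨c, hc', hp⟩ := hc
      exact (pvLocate_none_iff C w.1).mp hA c hc' hp
    have hcov2 : ¬ PvCov C w.2 := fun hc => by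
      obtain ⟨c, hc', hp⟩ := hc
      exact (pvLocate_none_iff C w.2).mp hB c hc' hp
    by_cases hw : w.1 = w.2
    · -- self-loop: no union, new singleton class
      rw [if_neg (by rw [hw]; simp)]
      rw [pvOfList2, if_pos hw.symm]
      refine ⟨⟨?_, ?_, ?_, ?_⟩, ?_, ?_, ?_⟩
      · intro p hp
        rw [pvCov_append] at hp
        push_neg at hp
        exact hI2.1 p hp.1
      · intro c hc
        rcases List.mem_append.mp hc with h | h
        · exact hI2.2.1 c h
        · rw [List.mem_singleton] at h
          subst h
          exact ⟨by simp, by simp, by simpa using h1⟩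
      · rw [PvDisj, List.pairwise_append]
        refine ⟨hI2.2.2.1, by simp, ?_⟩
        intro c hc c' hc' x hx
        rw [List.mem_singleton] at hc'
        subst hc'
        simp only [List.mem_singleton]
        rintro rfl
        exact hcov1 ⟨c, hc, hx⟩
      · intro c hc
        rcases List.mem_append.mp hc with h | h
        · exact hI2.2.2.2 c h
        · rw [List.mem_singleton] at h
          subst h
          exact ⟨w.1, by simp, fun p hp => by
            rw [List.mem_singleton] at hp
            subst hp
            exact ⟨0, .root _ (hI2.1 _ hcov1), by simp⟩⟩
      · intro p hp
        exact pvCov_append.mpr (.inl hp)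
      · exact pvCov_append.mpr (.inr (by simp))
      · exact pvCov_append.mpr (.inr (by simp [hw]))
    · -- two fresh points: link them, new two-element class
      rw [if_pos hw, pvOfList2, if_neg (fun h => hw h.symm)]
      have hcovApp : ∀ p, ¬ PvCov (C ++ [[w.1, w.2]]) p → ¬ PvCov C p ∧ p ≠ w.1 ∧ p ≠ w.2 := by
        intro p hp
        rw [pvCov_append] at hp
        push_neg at hp
        exact ⟨hp.1, fun h => hp.2 (by simp [h]), fun h => hp.2 (by simp [h])⟩
      have hwfApp : ∀ c ∈ C ++ [[w.1, w.2]], c.Nodup ∧ c ≠ [] ∧ ∀ x ∈ c, x ∈ P := by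
        intro c hc
        rcases List.mem_append.mp hc with h | h
        · exact hI2.2.1 c h
        · rw [List.mem_singleton] at h
          subst h
          refine ⟨by simp [hw], by simp, ?_⟩
          intro x hx
          rcases List.mem_cons.mp hx with rfl | hx
          · exact h1
          · rw [List.mem_singleton] at hx
            subst hx
            exact h2
      have hdApp : PvDisj (C ++ [[w.1, w.2]]) := by
        rw [PvDisj, List.pairwise_append]
        refine ⟨hI2.2.2.1, by simp, ?_⟩
        intro c hc c' hc' x hx
        rw [List.mem_singleton] at hc'
        subst hc'
        intro hmem
        rcases List.mem_cons.mp hmem with rfl | hmem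
        · exact hcov1 ⟨c, hc, hx⟩
        · rw [List.mem_singleton] at hmem
          subst hmem
          exact hcov2 ⟨c, hc, hx⟩
      have hchain1 : PvRooted F2.2.1 w.1 w.1 0 := .root _ (hI2.1 _ hcov1)
      have hchain2 : PvRooted F2.2.1 w.2 w.2 0 := .root _ (hI2.1 _ hcov2)
      have hchApp : ∀ (child parent : PvPt), child = w.1 ∧ parent = w.2 ∨ child = w.2 ∧ parent = w.1 →
          ∀ c ∈ C ++ [[w.1, w.2]], ∃ r ∈ c, r ≠ child ∧ ∀ p ∈ c, ∃ n,
            (PvRooted F2.2.1 p r n ∧ n < c.length) ∨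
            (r = parent ∧ PvRooted F2.2.1 p child n ∧ n + 1 < c.length) := by
        rintro child parent hcp c hc
        rcases List.mem_append.mp hc with h | h
        · obtain ⟨r, hr, hall⟩ := hI2.2.2.2 c h
          refine ⟨r, hr, ?_, fun p hp => ?_⟩
          · rcases hcp with ⟨rfl, _⟩ | ⟨rfl, _⟩
            · rintro rfl; exact hcov1 ⟨c, h, hr⟩
            · rintro rfl; exact hcov2 ⟨c, h, hr⟩
          · obtain ⟨n, hn, hb⟩ := hall p hp
            exact ⟨n, .inl ⟨hn, hb⟩⟩
        · rw [List.mem_singleton] at h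
          subst h
          rcases hcp with ⟨rfl, rfl⟩ | ⟨rfl, rfl⟩
          · refine ⟨w.2, by simp, fun h => hw h.symm, ?_⟩
            intro p hp
            rcases List.mem_cons.mp hp with rfl | hp
            · exact ⟨0, .inr ⟨rfl, hchain1, by simp⟩⟩
            · rw [List.mem_singleton] at hp
              subst hp
              exact ⟨0, .inl ⟨hchain2, by simp⟩⟩
          · refine ⟨w.1, by simp, hw, ?_⟩
            intro p hp
            rcases List.mem_cons.mp hp with rfl | hp
            · exact ⟨0, .inl ⟨hchain1, by simp⟩⟩
            · rw [List.mem_singleton] at hp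
              subst hp
              exact ⟨0, .inr ⟨rfl, hchain2, by simp⟩⟩
      refine ⟨?_, ?_, ?_, ?_⟩
      · by_cases hsz : F2.2.2.getD w.2 0 ≤ F2.2.2.getD w.1 0
        · rw [if_pos hsz]
          refine pvInv_link (fun h => hw h.symm) hfixb hfixa ?_ hwfApp hdApp
              (hchApp w.2 w.1 (.inr ⟨rfl, rfl⟩))
          intro p hp
          obtain ⟨hc, hp1, hp2⟩ := hcovApp p hp
          exact ⟨hI2.1 p hc, hp2⟩
        · rw [if_neg hsz]
          refine pvInv_link hw hfixa hfixb ?_ hwfApp hdApp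
              (hchApp w.1 w.2 (.inl ⟨rfl, rfl⟩))
          intro p hp
          obtain ⟨hc, hp1, hp2⟩ := hcovApp p hp
          exact ⟨hI2.1 p hc, hp1⟩
      · intro p hp
        exact pvCov_append.mpr (.inl hp)
      · exact pvCov_append.mpr (.inr (by simp))
      · exact pvCov_append.mpr (.inr (by simp))
  · -- w.1 uncovered, w.2 in class j
    simp only [pvStepB, hA, hB]
    have hcov1 : ¬ PvCov C w.1 := fun hc => by
      obtain ⟨c, hc', hp⟩ := hc
      exact (pvLocate_none_iff C w.1).mp hA c hc' hp
    have hw2j : w.2 ∈ C[j] := by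
      obtain ⟨hlt', hm⟩ := pvLocate_some hB
      exact hm
    have hab : w.1 ≠ rb := by
      rintro rfl
      exact hcov1 ⟨C[j], List.getElem_mem hjlt, hrbJ⟩
    rw [if_pos hab]
    have hw1j : w.1 ∉ C[j] := fun h => hcov1 ⟨C[j], List.getElem_mem hjlt, h⟩
    have hmod : C.modify j (fun c => PySem.Set.add c w.1)
        = C.take j ++ (C[j] ++ [w.1]) :: C.drop (j + 1) := by
      rw [List.modify_eq_set_get _ hjlt]
      simp only [List.get_eq_getElem]
      rw [PySem.Set.add_of_not_mem hw1j]
      exact pvSetAt hjlt _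
    rw [hmod]
    have hallB2 : ∀ q ∈ C[j], ∃ m, PvRooted F2.2.1 q rb m ∧ m < (C[j]).length := by
      intro q hq
      obtain ⟨m, hm, hb⟩ := hallB q hq
      obtain ⟨m', hm', h'⟩ := hpres12 _ _ _ hm
      exact ⟨m', h', by omega⟩
    have hCdec := pvDecomp hjlt
    have hlenj : 0 < (C[j]).length := List.length_pos_of_mem hw2j
    have hdisj' : PvDisj (C.take j ++ (C[j] ++ [w.1]) :: C.drop (j + 1)) := by
      apply pvDisj_mid (c := C[j])
      · rw [← hCdec]
        exact hI2.2.2.1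
      · intro x hx
        rcases List.mem_append.mp hx with h | h
        · exact .inl h
        · rw [List.mem_singleton] at h
          subst h
          right
          rw [← hCdec]
          exact hcov1
    have hwf' : ∀ c ∈ (C.take j ++ (C[j] ++ [w.1]) :: C.drop (j + 1)),
        c.Nodup ∧ c ≠ [] ∧ ∀ x ∈ c, x ∈ P := by
      intro c hc
      rcases List.mem_append.mp hc with h | h
      · exact hI2.2.1 c (List.mem_of_mem_take h)
      · rcases List.mem_cons.mp h with rfl | h
        · obtain ⟨hnd, hnn, hsub⟩ := hI2.2.1 _ (List.getElem_mem hjlt)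
          refine ⟨?_, by simp, ?_⟩
          · exact hnd.append (by simp) (List.disjoint_singleton.mpr hw1j)
          · intro x hx
            rcases List.mem_append.mp hx with hx | hx
            · exact hsub x hx
            · rw [List.mem_singleton] at hx
              subst hx
              exact h1
        · exact hI2.2.1 c (List.mem_of_mem_drop h)
    have hI1' : ∀ p, ¬ PvCov (C.take j ++ (C[j] ++ [w.1]) :: C.drop (j + 1)) p →
        F2.2.1.getD p p = p ∧ p ≠ w.1 ∧ p ≠ rb := by
      intro p hp
      rw [pvCov_mid] at hp
      push_neg at hp
      obtain ⟨hpT, hpu, hpD⟩ := hp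
      have hpc : ¬ PvCov C p := by
        rw [hCdec, pvCov_mid]
        push_neg
        exact ⟨hpT, fun h => hpu (List.mem_append_left _ h), hpD⟩
      exact ⟨hI2.1 p hpc, fun h => hpu (by simp [h]),
        fun h => hpu (List.mem_append_left _ (by rw [h]; exact hrbJ))⟩
    have hdC : PvDisj (C.take j ++ C[j] :: C.drop (j + 1)) := by
      rw [← hCdec]
      exact hI2.2.2.1
    rw [PvDisj, List.pairwise_append, List.pairwise_cons] at hdC
    obtain ⟨_, ⟨hmidD, _⟩, hcrossT⟩ := hdC
    have hch' : ∀ (child parent : PvPt), (w.1 = child ∧ rb = parent) ∨ (rb = child ∧ w.1 = parent) →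
        ∀ c ∈ (C.take j ++ (C[j] ++ [w.1]) :: C.drop (j + 1)), ∃ r ∈ c, r ≠ child ∧ ∀ p ∈ c, ∃ n,
          (PvRooted F2.2.1 p r n ∧ n < c.length) ∨
          (r = parent ∧ PvRooted F2.2.1 p child n ∧ n + 1 < c.length) := by
      rintro child parent hcp c hc
      rcases List.mem_append.mp hc with h | h
      · obtain ⟨r, hr, hall⟩ := hI2.2.2.2 c (List.mem_of_mem_take h)
        refine ⟨r, hr, ?_, fun p hp => ?_⟩
        · rcases hcp with ⟨hc1, _⟩ | ⟨hc1, _⟩ <;> rw [← hc1]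
          · rintro rfl
            exact hcov1 ⟨c, List.mem_of_mem_take h, hr⟩
          · intro hR
            rw [hR] at hr
            exact hcrossT c h (C[j]) (List.mem_cons_self ..) rb hr hrbJ
        · obtain ⟨n, hn, hb⟩ := hall p hp
          exact ⟨n, .inl ⟨hn, hb⟩⟩
      · rcases List.mem_cons.mp h with rfl | h
        · rcases hcp with ⟨hc1, hc2⟩ | ⟨hc1, hc2⟩ <;> rw [← hc1, ← hc2]
          · refine ⟨rb, List.mem_append_left _ hrbJ, fun h => hab h.symm, ?_⟩
            intro p hp
            rcases List.mem_append.mp hp with hp | hp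
            · obtain ⟨m, hm, hb⟩ := hallB2 p hp
              exact ⟨m, .inl ⟨hm, by simp; omega⟩⟩
            · rw [List.mem_singleton] at hp
              subst hp
              exact ⟨0, .inr ⟨rfl, .root _ hfixa, by simp; omega⟩⟩
          · refine ⟨w.1, List.mem_append_right _ (by simp), hab, ?_⟩
            intro p hp
            rcases List.mem_append.mp hp with hp | hp
            · obtain ⟨m, hm, hb⟩ := hallB2 p hp
              exact ⟨m, .inr ⟨rfl, hm, by simp; omega⟩⟩
            · rw [List.mem_singleton] at hp
              subst hp
              exact ⟨0, .inl ⟨.root _ hfixa, by simp⟩⟩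
        · obtain ⟨r, hr, hall⟩ := hI2.2.2.2 c (List.mem_of_mem_drop h)
          refine ⟨r, hr, ?_, fun p hp => ?_⟩
          · rcases hcp with ⟨hc1, _⟩ | ⟨hc1, _⟩ <;> rw [← hc1]
            · rintro rfl
              exact hcov1 ⟨c, List.mem_of_mem_drop h, hr⟩
            · intro hR
              rw [hR] at hr
              exact hmidD c h rb hrbJ hr
          · obtain ⟨n, hn, hb⟩ := hall p hp
            exact ⟨n, .inl ⟨hn, hb⟩⟩
    refine ⟨?_, ?_, ?_, ?_⟩
    · by_cases hsz : F2.2.2.getD rb 0 ≤ F2.2.2.getD w.1 0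
      · rw [if_pos hsz]
        refine pvInv_link (fun h => hab h.symm) hfixb hfixa
            (fun p hp => ⟨(hI1' p hp).1, (hI1' p hp).2.2⟩) hwf' hdisj'
            (hch' rb w.1 (.inr ⟨rfl, rfl⟩))
      · rw [if_neg hsz]
        refine pvInv_link hab hfixa hfixb
            (fun p hp => ⟨(hI1' p hp).1, (hI1' p hp).2.1⟩) hwf' hdisj'
            (hch' w.1 rb (.inl ⟨rfl, rfl⟩))
    · intro p hp
      rw [hCdec, pvCov_mid] at hp
      rw [pvCov_mid]
      rcases hp with hp | hp | hp
      · exact .inl hp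
      · exact .inr (.inl (List.mem_append_left _ hp))
      · exact .inr (.inr hp)
    · exact pvCov_mid.mpr (.inr (.inl (List.mem_append_right _ (by simp))))
    · exact pvCov_mid.mpr (.inr (.inl (List.mem_append_left _ hw2j)))
  · -- w.1 in class i, w.2 uncovered
    simp only [pvStepB, hA, hB]
    have hcov2 : ¬ PvCov C w.2 := fun hc => by
      obtain ⟨c, hc', hp⟩ := hc
      exact (pvLocate_none_iff C w.2).mp hB c hc' hp
    have hw1i : w.1 ∈ C[i] := by
      obtain ⟨hlt', hm⟩ := pvLocate_some hA
      exact hm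
    have hab : ra ≠ w.2 := by
      rintro rfl
      exact hcov2 ⟨C[i], List.getElem_mem hilt, hraI⟩
    rw [if_pos hab]
    have hw2i : w.2 ∉ C[i] := fun h => hcov2 ⟨C[i], List.getElem_mem hilt, h⟩
    have hmod : C.modify i (fun c => PySem.Set.add c w.2)
        = C.take i ++ (C[i] ++ [w.2]) :: C.drop (i + 1) := by
      rw [List.modify_eq_set_get _ hilt]
      simp only [List.get_eq_getElem]
      rw [PySem.Set.add_of_not_mem hw2i]
      exact pvSetAt hilt _
    rw [hmod]
    have hallA2 : ∀ q ∈ C[i], ∃ m, PvRooted F2.2.1 q ra m ∧ m < (C[i]).length := by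
      intro q hq
      obtain ⟨m, hm, hb⟩ := hallA q hq
      obtain ⟨m', hm', h'⟩ := hpres12 _ _ _ hm
      exact ⟨m', h', by omega⟩
    have hCdec := pvDecomp hilt
    have hleni : 0 < (C[i]).length := List.length_pos_of_mem hw1i
    have hdisj' : PvDisj (C.take i ++ (C[i] ++ [w.2]) :: C.drop (i + 1)) := by
      apply pvDisj_mid (c := C[i])
      · rw [← hCdec]
        exact hI2.2.2.1
      · intro x hx
        rcases List.mem_append.mp hx with h | h
        · exact .inl h
        · rw [List.mem_singleton] at h
          subst h
          right
          rw [← hCdec]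
          exact hcov2
    have hwf' : ∀ c ∈ (C.take i ++ (C[i] ++ [w.2]) :: C.drop (i + 1)),
        c.Nodup ∧ c ≠ [] ∧ ∀ x ∈ c, x ∈ P := by
      intro c hc
      rcases List.mem_append.mp hc with h | h
      · exact hI2.2.1 c (List.mem_of_mem_take h)
      · rcases List.mem_cons.mp h with rfl | h
        · obtain ⟨hnd, hnn, hsub⟩ := hI2.2.1 _ (List.getElem_mem hilt)
          refine ⟨?_, by simp, ?_⟩
          · exact hnd.append (by simp) (List.disjoint_singleton.mpr hw2i)
          · intro x hx
            rcases List.mem_append.mp hx with hx | hx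
            · exact hsub x hx
            · rw [List.mem_singleton] at hx
              subst hx
              exact h2
        · exact hI2.2.1 c (List.mem_of_mem_drop h)
    have hI1' : ∀ p, ¬ PvCov (C.take i ++ (C[i] ++ [w.2]) :: C.drop (i + 1)) p →
        F2.2.1.getD p p = p ∧ p ≠ w.2 ∧ p ≠ ra := by
      intro p hp
      rw [pvCov_mid] at hp
      push_neg at hp
      obtain ⟨hpT, hpu, hpD⟩ := hp
      have hpc : ¬ PvCov C p := by
        rw [hCdec, pvCov_mid]
        push_neg
        exact ⟨hpT, fun h => hpu (List.mem_append_left _ h), hpD⟩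
      exact ⟨hI2.1 p hpc, fun h => hpu (by simp [h]),
        fun h => hpu (List.mem_append_left _ (by rw [h]; exact hraI))⟩
    have hdC : PvDisj (C.take i ++ C[i] :: C.drop (i + 1)) := by
      rw [← hCdec]
      exact hI2.2.2.1
    rw [PvDisj, List.pairwise_append, List.pairwise_cons] at hdC
    obtain ⟨_, ⟨hmidD, _⟩, hcrossT⟩ := hdC
    have hch' : ∀ (child parent : PvPt), (w.2 = child ∧ ra = parent) ∨ (ra = child ∧ w.2 = parent) →
        ∀ c ∈ (C.take i ++ (C[i] ++ [w.2]) :: C.drop (i + 1)), ∃ r ∈ c, r ≠ child ∧ ∀ p ∈ c, ∃ n,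
          (PvRooted F2.2.1 p r n ∧ n < c.length) ∨
          (r = parent ∧ PvRooted F2.2.1 p child n ∧ n + 1 < c.length) := by
      rintro child parent hcp c hc
      rcases List.mem_append.mp hc with h | h
      · obtain ⟨r, hr, hall⟩ := hI2.2.2.2 c (List.mem_of_mem_take h)
        refine ⟨r, hr, ?_, fun p hp => ?_⟩
        · rcases hcp with ⟨hc1, _⟩ | ⟨hc1, _⟩ <;> rw [← hc1]
          · rintro rfl
            exact hcov2 ⟨c, List.mem_of_mem_take h, hr⟩
          · intro hR
            rw [hR] at hr
            exact hcrossT c h (C[i]) (List.mem_cons_self ..) ra hr hraI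
        · obtain ⟨n, hn, hb⟩ := hall p hp
          exact ⟨n, .inl ⟨hn, hb⟩⟩
      · rcases List.mem_cons.mp h with rfl | h
        · rcases hcp with ⟨hc1, hc2⟩ | ⟨hc1, hc2⟩ <;> rw [← hc1, ← hc2]
          · refine ⟨ra, List.mem_append_left _ hraI, hab, ?_⟩
            intro p hp
            rcases List.mem_append.mp hp with hp | hp
            · obtain ⟨m, hm, hb⟩ := hallA2 p hp
              exact ⟨m, .inl ⟨hm, by simp; omega⟩⟩
            · rw [List.mem_singleton] at hp
              subst hp
              exact ⟨0, .inr ⟨rfl, .root _ hfixb, by simp; omega⟩⟩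
          · refine ⟨w.2, List.mem_append_right _ (by simp), fun h => hab h.symm, ?_⟩
            intro p hp
            rcases List.mem_append.mp hp with hp | hp
            · obtain ⟨m, hm, hb⟩ := hallA2 p hp
              exact ⟨m, .inr ⟨rfl, hm, by simp; omega⟩⟩
            · rw [List.mem_singleton] at hp
              subst hp
              exact ⟨0, .inl ⟨.root _ hfixb, by simp⟩⟩
        · obtain ⟨r, hr, hall⟩ := hI2.2.2.2 c (List.mem_of_mem_drop h)
          refine ⟨r, hr, ?_, fun p hp => ?_⟩
          · rcases hcp with ⟨hc1, _⟩ | ⟨hc1, _⟩ <;> rw [← hc1]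
            · rintro rfl
              exact hcov2 ⟨c, List.mem_of_mem_drop h, hr⟩
            · intro hR
              rw [hR] at hr
              exact hmidD c h ra hraI hr
          · obtain ⟨n, hn, hb⟩ := hall p hp
            exact ⟨n, .inl ⟨hn, hb⟩⟩
    refine ⟨?_, ?_, ?_, ?_⟩
    · by_cases hsz : F2.2.2.getD w.2 0 ≤ F2.2.2.getD ra 0
      · rw [if_pos hsz]
        refine pvInv_link (fun h => hab h.symm) hfixb hfixa
            (fun p hp => ⟨(hI1' p hp).1, (hI1' p hp).2.1⟩) hwf' hdisj'
            (hch' w.2 ra (.inl ⟨rfl, rfl⟩))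
      · rw [if_neg hsz]
        refine pvInv_link hab hfixa hfixb
            (fun p hp => ⟨(hI1' p hp).1, (hI1' p hp).2.2⟩) hwf' hdisj'
            (hch' ra w.2 (.inr ⟨rfl, rfl⟩))
    · intro p hp
      rw [hCdec, pvCov_mid] at hp
      rw [pvCov_mid]
      rcases hp with hp | hp | hp
      · exact .inl hp
      · exact .inr (.inl (List.mem_append_left _ hp))
      · exact .inr (.inr hp)
    · exact pvCov_mid.mpr (.inr (.inl (List.mem_append_left _ hw1i)))
    · exact pvCov_mid.mpr (.inr (.inl (List.mem_append_right _ (by simp))))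
  · -- both covered
    simp only [pvStepB, hA, hB]
    have hw1i : w.1 ∈ C[i] := by
      obtain ⟨hlt', hm⟩ := pvLocate_some hA
      exact hm
    have hw2j : w.2 ∈ C[j] := by
      obtain ⟨hlt', hm⟩ := pvLocate_some hB
      exact hm
    have hallA2 : ∀ q ∈ C[i], ∃ m, PvRooted F2.2.1 q ra m ∧ m < (C[i]).length := by
      intro q hq
      obtain ⟨m, hm, hb⟩ := hallA q hq
      obtain ⟨m', hm', h'⟩ := hpres12 _ _ _ hm
      exact ⟨m', h', by omega⟩
    have hallB2 : ∀ q ∈ C[j], ∃ m, PvRooted F2.2.1 q rb m ∧ m < (C[j]).length := by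
      intro q hq
      obtain ⟨m, hm, hb⟩ := hallB q hq
      obtain ⟨m', hm', h'⟩ := hpres12 _ _ _ hm
      exact ⟨m', h', by omega⟩
    by_cases hij : i = j
    · subst hij
      have hrarb : ra = rb := by
        obtain ⟨m, hm, _⟩ := hallA w.2 hw2j
        exact (pvRooted_unique hm hrb).1
      rw [if_neg (show ¬ ra ≠ rb from fun h => h hrarb), if_neg (show ¬ i ≠ i from fun h => h rfl)]
      exact ⟨hI2, fun p hp => hp, ⟨C[i], List.getElem_mem hilt, hw1i⟩,
        ⟨C[i], List.getElem_mem hilt, hw2j⟩⟩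
    · have hab : ra ≠ rb := by
        intro h
        exact (pvDisj_getElem hI2.2.2.1 hilt hjlt hij hraI) (by rw [h]; exact hrbJ)
      rw [if_pos hab, if_pos hij]
      rcases Nat.lt_or_ge i j with hlt | hge
      · have hmin : min i j = i := Nat.min_eq_left (le_of_lt hlt)
        have hmax : max i j = j := Nat.max_eq_right (le_of_lt hlt)
        rw [hmin, hmax]
        have hndj := (hI2.2.1 _ (List.getElem_mem hjlt)).1
        have hdisjji : ∀ x ∈ C[j], x ∉ C[i] := fun x hx =>
          pvDisj_getElem hI2.2.2.1 hjlt hilt (fun h => hij h.symm) hx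
        have hun : PySem.Set.union (C[i]) (C.getD j PySem.Set.empty) = C[i] ++ C[j] := by
          rw [List.getD_eq_getElem C _ hjlt]
          exact pvUnion_disjoint _ _ hndj hdisjji
        have hmod : C.modify i (fun c => PySem.Set.union c (C.getD j PySem.Set.empty))
            = C.set i (C[i] ++ C[j]) := by
          rw [List.modify_eq_set_get _ hilt]
          simp only [List.get_eq_getElem]
          rw [hun]
        rw [hmod, pvSetErase hilt hjlt hlt]
        have hIdec : PvInv P (C.take i ++ C[i] :: ((C.take j).drop (i + 1) ++ C[j] :: C.drop (j + 1))) F2.2.1 := by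
          rw [← pvDecomp2 hilt hjlt hlt]
          exact hI2
        refine ⟨?_, ?_, ?_, ?_⟩
        · by_cases hsz : F2.2.2.getD rb 0 ≤ F2.2.2.getD ra 0
          · rw [if_pos hsz]
            exact (pvMerge_core hIdec hraI hrbJ hallA2 hallB2 hab (.inr ⟨rfl, rfl⟩)).1
          · rw [if_neg hsz]
            exact (pvMerge_core hIdec hraI hrbJ hallA2 hallB2 hab (.inl ⟨rfl, rfl⟩)).1
        · intro p hp
          apply (pvMerge_core hIdec hraI hrbJ hallA2 hallB2 hab (.inl ⟨rfl, rfl⟩)).2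
          rw [← pvDecomp2 hilt hjlt hlt]
          exact hp
        · apply (pvMerge_core hIdec hraI hrbJ hallA2 hallB2 hab (.inl ⟨rfl, rfl⟩)).2
          rw [← pvDecomp2 hilt hjlt hlt]
          exact ⟨C[i], List.getElem_mem hilt, hw1i⟩
        · apply (pvMerge_core hIdec hraI hrbJ hallA2 hallB2 hab (.inl ⟨rfl, rfl⟩)).2
          rw [← pvDecomp2 hilt hjlt hlt]
          exact ⟨C[j], List.getElem_mem hjlt, hw2j⟩
      · have hlt' : j < i := by omega
        have hmin : min i j = j := by omega
        have hmax : max i j = i := by omega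
        rw [hmin, hmax]
        have hndi := (hI2.2.1 _ (List.getElem_mem hilt)).1
        have hdisjij : ∀ x ∈ C[i], x ∉ C[j] := fun x hx =>
          pvDisj_getElem hI2.2.2.1 hilt hjlt hij hx
        have hun : PySem.Set.union (C[j]) (C.getD i PySem.Set.empty) = C[j] ++ C[i] := by
          rw [List.getD_eq_getElem C _ hilt]
          exact pvUnion_disjoint _ _ hndi hdisjij
        have hmod : C.modify j (fun c => PySem.Set.union c (C.getD i PySem.Set.empty))
            = C.set j (C[j] ++ C[i]) := by
          rw [List.modify_eq_set_get _ hjlt]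
          simp only [List.get_eq_getElem]
          rw [hun]
        rw [hmod, pvSetErase hjlt hilt hlt']
        have hIdec : PvInv P (C.take j ++ C[j] :: ((C.take i).drop (j + 1) ++ C[i] :: C.drop (i + 1))) F2.2.1 := by
          rw [← pvDecomp2 hjlt hilt hlt']
          exact hI2
        have hba : rb ≠ ra := fun h => hab h.symm
        refine ⟨?_, ?_, ?_, ?_⟩
        · by_cases hsz : F2.2.2.getD rb 0 ≤ F2.2.2.getD ra 0
          · rw [if_pos hsz]
            exact (pvMerge_core hIdec hrbJ hraI hallB2 hallA2 hba (.inl ⟨rfl, rfl⟩)).1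
          · rw [if_neg hsz]
            exact (pvMerge_core hIdec hrbJ hraI hallB2 hallA2 hba (.inr ⟨rfl, rfl⟩)).1
        · intro p hp
          apply (pvMerge_core hIdec hrbJ hraI hallB2 hallA2 hba (.inl ⟨rfl, rfl⟩)).2
          rw [← pvDecomp2 hjlt hilt hlt']
          exact hp
        · apply (pvMerge_core hIdec hrbJ hraI hallB2 hallA2 hba (.inl ⟨rfl, rfl⟩)).2
          rw [← pvDecomp2 hjlt hilt hlt']
          exact ⟨C[i], List.getElem_mem hilt, hw1i⟩
        · apply (pvMerge_core hIdec hrbJ hraI hallB2 hallA2 hba (.inl ⟨rfl, rfl⟩)).2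
          rw [← pvDecomp2 hjlt hilt hlt']
          exact ⟨C[j], List.getElem_mem hjlt, hw2j⟩

def pvRootIter (f : PvF) : Nat → PvPt → PvPt
  | 0, p => p
  | k + 1, p => if f.getD p p = p then p else pvRootIter f k (f.getD p p)

theorem pvRootIter_eq {f : PvF} {p r : PvPt} {n : Nat} (h : PvRooted f p r n) :
    ∀ k, n ≤ k → pvRootIter f k p = r := by
  induction h with
  | root q hq =>
    intro k _
    match k with
    | 0 => rfl
    | k + 1 => simp [pvRootIter, hq]
  | step q r m hne ht ih =>
    intro k hk
    match k, hk with
    | k + 1, hk =>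
      simp only [pvRootIter, if_neg hne]
      exact ih k (by omega)

theorem pvPointsNodup : ∀ (walls : List (PvPt × PvPt)) (s : PySem.Set PvPt), s.Nodup →
    (walls.foldl (fun ps w => PySem.Set.add (PySem.Set.add ps w.1) w.2) s).Nodup := by
  intro walls
  induction walls with
  | nil => intro s hs; exact hs
  | cons w walls ih =>
    intro s hs
    have h2 := PySem.Set.nodup_add (PySem.Set.add s w.1) w.2 (PySem.Set.nodup_add s w.1 hs)
    exact ih _ h2

theorem pvMemAddL {s : PySem.Set PvPt} {x y : PvPt} (h : y ∈ s) : y ∈ PySem.Set.add s x := by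
  rw [PySem.Set.add_eq_ite]
  split <;> simp [h]

theorem pvMemAddSelf (s : PySem.Set PvPt) (x : PvPt) : x ∈ PySem.Set.add s x := by
  rw [PySem.Set.add_eq_ite]
  split
  · assumption
  · simp

theorem pvPointsMem : ∀ (walls : List (PvPt × PvPt)) (s : PySem.Set PvPt),
    ∀ w ∈ walls, w.1 ∈ walls.foldl (fun ps w => PySem.Set.add (PySem.Set.add ps w.1) w.2) s ∧
      w.2 ∈ walls.foldl (fun ps w => PySem.Set.add (PySem.Set.add ps w.1) w.2) s := by
  have hmono : ∀ (walls : List (PvPt × PvPt)) (s : PySem.Set PvPt) (y : PvPt), y ∈ s →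
      y ∈ walls.foldl (fun ps w => PySem.Set.add (PySem.Set.add ps w.1) w.2) s := by
    intro walls
    induction walls with
    | nil => intro s y hy; exact hy
    | cons w walls ih =>
      intro s y hy
      exact ih _ y (pvMemAddL (pvMemAddL hy))
  intro walls
  induction walls with
  | nil => intro s w hw; simp at hw
  | cons v walls ih =>
    intro s w hw
    rcases List.mem_cons.mp hw with rfl | hw
    · constructor
      · exact hmono walls _ _ (pvMemAddL (pvMemAddSelf _ _))
      · exact hmono walls _ _ (pvMemAddSelf _ _)
    · exact ih _ w hw

theorem pvF0getD : ∀ (pts : List PvPt) (d : PvF), (∀ q, d.getD q q = q) →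
    ∀ q, (pts.foldl (fun d p => d.insert p p) d).getD q q = q := by
  intro pts
  induction pts with
  | nil => intro d hd q; exact hd q
  | cons p pts ih =>
    intro d hd q
    refine ih _ (fun q' => ?_) q
    rw [PySem.Dict.getD_insert]
    split
    · next h => exact h.symm
    · exact hd q'

theorem pvPhase2 (P : List PvPt) (hPn : P.Nodup) :
    ∀ (tw : List (PvPt × PvPt)) (f : PvF) (s : PySem.Dict PvPt Int) (C : List (List PvPt)),
    (∀ w ∈ tw, w.1 ∈ P ∧ w.2 ∈ P) → PvInv P C f →
    PvInv P (tw.foldl pvStepB C)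
        (tw.foldl (pvUnionStep P.length) (f, s)).1 ∧
    (∀ p, PvCov C p → PvCov (tw.foldl pvStepB C) p) ∧
    (∀ w ∈ tw, PvCov (tw.foldl pvStepB C) w.1 ∧ PvCov (tw.foldl pvStepB C) w.2) := by
  intro tw
  induction tw with
  | nil =>
    intro f s C _ hI
    exact ⟨hI, fun p hp => hp, by simp⟩
  | cons w tw ih =>
    intro f s C htw hI
    obtain ⟨hIw, hmono, hc1, hc2⟩ := pvUnion_sim s w hPn (htw w (by simp)).1 (htw w (by simp)).2 hI
    simp only [List.foldl_cons, pvUnionStep]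
    obtain ⟨h1, h2, h3⟩ := ih (pvUnionA P.length f s w.1 w.2).1 (pvUnionA P.length f s w.1 w.2).2
      (pvStepB C w) (fun w' hw' => htw w' (by simp [hw'])) hIw
    refine ⟨?_, ?_, ?_⟩
    · simpa using h1
    · intro p hp
      exact h2 p (hmono p hp)
    · intro w' hw'
      rcases List.mem_cons.mp hw' with rfl | hw'
      · exact ⟨h2 _ hc1, h2 _ hc2⟩
      · exact h3 w' hw'

theorem pvPhase3 (P : List PvPt) (hPn : P.Nodup) (C : List (List PvPt)) (fmid : PvF)
    (hmid : PvInv P C fmid) :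
    ∀ (tw : List (PvPt × PvPt)) (f : PvF) (sz : PySem.Dict PvPt Int) (cnt : Int)
      (f2i : PySem.Dict PvPt Int) (idxOf : PySem.Dict (Option Nat) Int)
      (result : List (List (PvPt × PvPt))),
    (∀ w ∈ tw, w.1 ∈ P ∧ PvCov C w.1) →
    PvInv P C f →
    (∀ q r m, PvRooted fmid q r m → ∃ m' ≤ m, PvRooted f q r m') →
    cnt = (result.length : Int) →
    (∀ q ∈ P, PvCov C q →
        f2i.get? (pvRootIter fmid P.length q) = idxOf.get? (pvLocate C q)) →
    (tw.foldl (pvStep3A P.length) (f, sz, cnt, f2i, result)).2.2.2.2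
    = (tw.foldl (pvStep3B C) (idxOf, result)).2 := by
  intro tw
  induction tw with
  | nil =>
    intro f sz cnt f2i idxOf result _ _ _ _ _
    rfl
  | cons w tw ih =>
    intro f sz cnt f2i idxOf result htw hI hpres hcnt hcorr
    obtain ⟨hwP, hwC⟩ := htw w (by simp)
    obtain ⟨r, n, hchmid, hnlt, hcase⟩ := pvRoot_of_endpoint hmid hPn hwP
    rcases hcase with ⟨hnone, _⟩ | ⟨i, hilt, hloc, hrI, hallI⟩
    · exfalso
      obtain ⟨c, hc, hp⟩ := hwC
      exact (pvLocate_none_iff C w.1).mp hnone c hc hp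
    have hkey : pvRootIter fmid P.length w.1 = r := pvRootIter_eq hchmid _ (by omega)
    obtain ⟨n', hne', hch⟩ := hpres _ _ _ hchmid
    obtain ⟨hres1, hpresF⟩ := pvFind_spec P.length f sz w.1 r n' hch (by omega)
    have hI' : PvInv P C (pvFindA P.length f sz w.1).2.1 := pvInv_mono hpresF hI
    have hpres' : ∀ q r' m, PvRooted fmid q r' m →
        ∃ m' ≤ m, PvRooted (pvFindA P.length f sz w.1).2.1 q r' m' := by
      intro q r' m hm
      obtain ⟨m1, hm1, h1⟩ := hpres q r' m hm
      obtain ⟨m2, hm2, h2⟩ := hpresF q r' m1 h1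
      exact ⟨m2, by omega, h2⟩
    have hget := hcorr w.1 hwP hwC
    rw [hkey] at hget
    have hcnt2 : f2i.contains r = idxOf.contains (pvLocate C w.1) := by
      rw [PySem.Dict.contains_eq_isSome_get?, PySem.Dict.contains_eq_isSome_get?, hget]
    simp only [List.foldl_cons, pvStep3A, pvStep3B]
    rw [hres1]
    by_cases hcc : f2i.contains r = true
    · have hccB : idxOf.contains (pvLocate C w.1) = true := by
        rw [← hcnt2]
        exact hcc
      have hgd : f2i.getD r 0 = idxOf.getD (pvLocate C w.1) 0 := by
        rw [PySem.Dict.getD_eq_get?_getD, PySem.Dict.getD_eq_get?_getD, hget]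
      rw [if_neg (by simp [hcc]), if_neg (by simp [hccB])]
      dsimp only
      rw [hgd]
      refine ih (pvFindA P.length f sz w.1).2.1 (pvFindA P.length f sz w.1).2.2 cnt f2i idxOf
        (result.modify (idxOf.getD (pvLocate C w.1) 0).toNat (fun g => g ++ [w]))
        (fun w' hw' => htw w' (List.mem_cons_of_mem _ hw')) hI' hpres' (by simpa using hcnt) hcorr
    · have hccB : ¬ idxOf.contains (pvLocate C w.1) = true := by
        rw [← hcnt2]
        exact hcc
      rw [if_pos (by simp [hcc]), if_pos (by simp [hccB])]
      dsimp only
      rw [PySem.Dict.getD_insert_self, PySem.Dict.getD_insert_self, hcnt]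
      have hcorr' : ∀ q ∈ P, PvCov C q →
          (f2i.insert r (result.length : Int)).get? (pvRootIter fmid P.length q)
            = (idxOf.insert (pvLocate C w.1) (result.length : Int)).get? (pvLocate C q) := by
        intro q hq hqC
        obtain ⟨rq, nq, hqmid, hnq, hqcase⟩ := pvRoot_of_endpoint hmid hPn hq
        rcases hqcase with ⟨hqnone, _⟩ | ⟨iq, hiqlt, hqloc, hrqI, hallIq⟩
        · exfalso
          obtain ⟨c, hc, hp⟩ := hqC
          exact (pvLocate_none_iff C q).mp hqnone c hc hp
        have hkeyq : pvRootIter fmid P.length q = rq := pvRootIter_eq hqmid _ (by omega)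
        rw [hkeyq, hqloc, hloc, PySem.Dict.get?_insert, PySem.Dict.get?_insert]
        have hiff : rq = r ↔ iq = i := by
          constructor
          · intro h
            by_contra hne2
            exact (pvDisj_getElem hmid.2.2.1 hiqlt hilt hne2 hrqI) (by rw [h]; exact hrI)
          · intro h
            subst h
            obtain ⟨hlt2, hqmem⟩ := pvLocate_some hqloc
            obtain ⟨m2, hm2, _⟩ := hallI q hqmem
            exact (pvRooted_unique hqmid hm2).1
        by_cases hqi : iq = i
        · rw [if_pos (hiff.mpr hqi), if_pos (by rw [hqi])]
        · rw [if_neg (fun h => hqi (hiff.mp h)), if_neg (by simp [hqi])]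
          have hco := hcorr q hq hqC
          rw [hkeyq, hqloc] at hco
          exact hco
      refine ih (pvFindA P.length f sz w.1).2.1 (pvFindA P.length f sz w.1).2.2
        ((result.length : Int) + 1) (f2i.insert r (result.length : Int))
        (idxOf.insert (pvLocate C w.1) (result.length : Int))
        ((result ++ [[]]).modify (result.length : Int).toNat (fun g => g ++ [w]))
        (fun w' hw' => htw w' (List.mem_cons_of_mem _ hw')) hI' hpres' (by simp) hcorr'

def pvPts (walls : List (PvPt × PvPt)) : PySem.Set PvPt :=
  walls.foldl (fun ps w => PySem.Set.add (PySem.Set.add ps w.1) w.2) PySem.Set.empty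

theorem pvMapEta (l : List (PvPt × PvPt)) :
    l.map (fun w => ((w.1.1, w.1.2), (w.2.1, w.2.2))) = l := by
  simp

theorem pvCollect_pair' : ∀ (walls : List (PvPt × PvPt)) (acc : List (PvPt × PvPt))
    (s : PySem.Set PvPt), walls.foldl pvCollectA (acc, s)
      = (acc ++ walls, walls.foldl (fun ps w => PySem.Set.add (PySem.Set.add ps w.1) w.2) s) := by
  intro walls
  induction walls with
  | nil =>
    intro acc s
    simp
  | cons w walls ih =>
    intro acc s
    simp only [List.foldl_cons]
    rw [show pvCollectA (acc, s) w
        = (acc ++ [w], PySem.Set.add (PySem.Set.add s w.1) w.2) from by simp [pvCollectA]]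
    rw [ih]
    simp

theorem pvCollect_pair (walls : List (PvPt × PvPt)) :
    walls.foldl pvCollectA ([], PySem.Set.empty) = (walls, pvPts walls) := by
  simpa [pvPts] using pvCollect_pair' walls [] PySem.Set.empty

theorem pvInit_pair' : ∀ (pts : List PvPt) (d1 : PvF) (d2 : PySem.Dict PvPt Int),
    pts.foldl pvInitA (d1, d2)
      = (pts.foldl (fun d p => d.insert p p) d1, pts.foldl (fun d p => d.insert p (1 : Int)) d2) := by
  intro pts
  induction pts with
  | nil =>
    intro d1 d2
    rfl
  | cons p pts ih =>
    intro d1 d2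
    simp only [List.foldl_cons]
    exact ih _ _

theorem pvInit_pair (pts : List PvPt) :
    pts.foldl pvInitA (PySem.Dict.empty, PySem.Dict.empty)
      = (pts.foldl (fun d p => d.insert p p) PySem.Dict.empty,
         pts.foldl (fun d p => d.insert p (1 : Int)) PySem.Dict.empty) :=
  pvInit_pair' pts PySem.Dict.empty PySem.Dict.empty

theorem group_walls_eq (walls : List ((Int × Int) × (Int × Int))) :
    group_walls walls = group_walls_alt walls := by
  have hPn : (pvPts walls).Nodup := pvPointsNodup walls PySem.Set.empty (by simp [PySem.Set.empty])
  have hmemP := pvPointsMem walls PySem.Set.empty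
  have hI0 : PvInv (pvPts walls) []
      ((pvPts walls).foldl (fun d p => d.insert p p) PySem.Dict.empty) := by
    refine ⟨fun p _ => pvF0getD _ _ (fun q => by simp) p, by simp, ?_, by simp⟩
    simp [PvDisj]
  obtain ⟨hmidI, hcovmono, hcov⟩ := pvPhase2 (pvPts walls) hPn walls
    ((pvPts walls).foldl (fun d p => d.insert p p) PySem.Dict.empty)
    ((pvPts walls).foldl (fun d p => d.insert p (1 : Int)) PySem.Dict.empty)
    [] (fun w hw => hmemP w hw) hI0
  have h3 := pvPhase3 (pvPts walls) hPn (walls.foldl pvStepB []) _ hmidI walls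
    (walls.foldl (pvUnionStep (pvPts walls).length)
      ((pvPts walls).foldl (fun d p => d.insert p p) PySem.Dict.empty,
       (pvPts walls).foldl (fun d p => d.insert p (1 : Int)) PySem.Dict.empty)).1
    (walls.foldl (pvUnionStep (pvPts walls).length)
      ((pvPts walls).foldl (fun d p => d.insert p p) PySem.Dict.empty,
       (pvPts walls).foldl (fun d p => d.insert p (1 : Int)) PySem.Dict.empty)).2
    0 PySem.Dict.empty PySem.Dict.empty []
    (fun w hw => ⟨(hmemP w hw).1, (hcov w hw).1⟩) hmidI
    (fun q r m h => ⟨m, le_refl _, h⟩) (by simp)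
    (fun q _ _ => by simp [PySem.Dict.get?_empty])
  simp only [group_walls, group_walls_alt, pvCollect_pair, pvInit_pair, pvMapEta]
  rw [h3]

-- ===== VERDICT (by name: the statement is the Claim_ definition above) =====
theorem group_walls_spec : Claim_equal_group_walls := by
  intro walls _
  show group_walls walls = group_walls_alt walls
  exact group_walls_eq walls
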